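-- pv_equiv track=rewrite | github.com/sang-gyeong/Coding_Test | Test/21라상_TEST/level/test2.py | isFlagArgTypeMatch
-- ===== SOURCE A (Python) =====
-- def isFlagArgTypeMatch(flags, flag_dict):
--     for flag in flags:
--         # arg가 없는 경우
--         if len(flag.split()) == 1:
--             if flag_dict.get(flag) == None or flag_dict[flag] != "NULL":
--                 return False
--             continue
--
--         flag_items = flag.split()
--         flag_name, flag_args = flag_items[0], flag_items[1:]
--         # 4. flag_rules에 존재하는 flag만 나타나는지 판별
--         if flag_dict.get(flag_name) == None:
--             return False
--
--         flag_arg_type = flag_dict[flag_name]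
--         if flag_arg_type == 'NUMBER':
--             if len(flag_args) > 1:
--                 return False
--             for arg in flag_args:
--                 if arg.isdigit() == False:
--                     return False
--         elif flag_arg_type == 'STRING':
--             if len(flag_args) > 1:
--                 return False
--             for arg in flag_args:
--                 if arg.isalpha() == False:
--                     return False
--         elif flag_arg_type == 'NULL':
--             return False
--         elif flag_arg_type == 'NUMBERS':
--             for arg in flag_args:
--                 if arg.isdigit() == False:
--                     return False
--         elif flag_arg_type == 'STRINGS':
--             for arg in flag_args:
--                 if arg.isalpha() == False:
--                     return False
--         elif flag_arg_type not in ['NUMBER', 'STRING', 'NULL', 'NUMBERS', 'STRINGS']: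
--             return False
--     return True
-- ===== SOURCE B (Python) =====
-- # B inverts A's dispatch: instead of branching on the declared type, it computes
-- # from the argument list the SET of types that would accept it, then does one
-- # membership test against flag_dict.get(name). Objective: alternative.
--
--
-- def isFlagArgTypeMatch(flags, flag_dict):
--     for flag in flags:
--         items = flag.split()
--         name, args = items[0], items[1:]
--         if not args:
--             accepted = {'NULL'}
--         else:
--             accepted = set()
--             if all(a.isdigit() for a in args):
--                 accepted.add('NUMBERS')
--                 if len(args) == 1:
--                     accepted.add('NUMBER')
--             if all(a.isalpha() for a in args):
--                 accepted.add('STRINGS')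
--                 if len(args) == 1:
--                     accepted.add('STRING')
--         if flag_dict.get(name) not in accepted:
--             return False
--     return True
-- ===== Notes on version B (the rewrite author's own statement) =====
-- stated objective: alternative
-- what changed: A branches on the declared type with a five-way if/elif ladder per flag; B inverts the dispatch: from the argument list alone it computes the set of type names that would accept those arguments ({'NULL'} when no args, else NUMBER/NUMBERS/STRING/STRINGS by arity and character class) and then performs a single membership test flag_dict.get(name) in accepted.
-- outside the precondition, e.g. on isFlagArgTypeMatch([' -v '], {' -v ': 'NULL'}): A returns True, B returns False; on isFlagArgTypeMatch([''], {}): A raises IndexError, B raises IndexError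
import Mathlib
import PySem

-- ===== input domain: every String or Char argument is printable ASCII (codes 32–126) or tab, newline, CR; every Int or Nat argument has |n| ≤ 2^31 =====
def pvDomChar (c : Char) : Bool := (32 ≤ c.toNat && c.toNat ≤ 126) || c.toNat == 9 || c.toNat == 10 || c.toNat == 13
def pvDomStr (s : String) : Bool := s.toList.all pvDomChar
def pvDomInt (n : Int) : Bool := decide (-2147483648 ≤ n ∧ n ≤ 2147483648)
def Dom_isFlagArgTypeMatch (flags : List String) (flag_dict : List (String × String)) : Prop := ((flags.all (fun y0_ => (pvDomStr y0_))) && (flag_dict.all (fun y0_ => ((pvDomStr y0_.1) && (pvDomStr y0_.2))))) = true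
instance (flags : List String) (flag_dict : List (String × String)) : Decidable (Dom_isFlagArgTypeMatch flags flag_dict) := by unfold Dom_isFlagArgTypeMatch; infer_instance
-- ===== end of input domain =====

set_option maxHeartbeats 1000000


-- ===== PORT A =====
-- B inverts A's per-type dispatch: it computes from the argument list the set of
-- type names that would accept it and does one membership test; objective: alternative.
-- A: loop over flags with early returns; separate no-arg branch, then if/elif type ladder.
def isFlagArgTypeMatch (flags : List String) (flag_dict : List (String × String)) : Bool :=
  match flags with
  | [] => true
  | flag :: rest =>
    let items := PySem.Str.split₀ flag
    if items.length == 1 then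
      -- `flag_dict.get(flag) == None or flag_dict[flag] != "NULL"` (short-circuit)
      match (PySem.Dict.mk flag_dict).get? flag with
      | none => false
      | some v => if v != "NULL" then false else isFlagArgTypeMatch rest flag_dict
    else
      -- flag_items[0] raises on an empty split; excluded by Pre_, headD is arbitrary there
      let flag_name := items.headD ""
      let flag_args := items.tail
      match (PySem.Dict.mk flag_dict).get? flag_name with
      | none => false
      | some t =>
        if t == "NUMBER" then
          if flag_args.length > 1 then false
          else if flag_args.all PySem.Str.strIsdigit then isFlagArgTypeMatch rest flag_dict else false
        else if t == "STRING" then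
          if flag_args.length > 1 then false
          else if flag_args.all PySem.Str.strIsalpha then isFlagArgTypeMatch rest flag_dict else false
        else if t == "NULL" then false
        else if t == "NUMBERS" then
          if flag_args.all PySem.Str.strIsdigit then isFlagArgTypeMatch rest flag_dict else false
        else if t == "STRINGS" then
          if flag_args.all PySem.Str.strIsalpha then isFlagArgTypeMatch rest flag_dict else false
        else false

-- ===== PORT B =====
-- the set of type names that accept this argument list
def pvAccepted (args : List String) : PySem.Set String :=
  if args.isEmpty then PySem.Set.ofList ["NULL"]
  else
    let acc : PySem.Set String := PySem.Set.empty
    let acc := if args.all PySem.Str.strIsdigit then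
        let acc := PySem.Set.add acc "NUMBERS"
        if args.length == 1 then PySem.Set.add acc "NUMBER" else acc
      else acc
    let acc := if args.all PySem.Str.strIsalpha then
        let acc := PySem.Set.add acc "STRINGS"
        if args.length == 1 then PySem.Set.add acc "STRING" else acc
      else acc
    acc

-- loop body: `flag_dict.get(name) not in accepted` → early False.
-- (None is never a member of a set of strings, so get? = none fails the test.)
def pvFlagOk (flag : String) (flag_dict : List (String × String)) : Bool :=
  let items := PySem.Str.split₀ flag
  let name := items.headD ""   -- items[0]; raises on empty split, excluded by Pre_
  let args := items.tail
  match (PySem.Dict.mk flag_dict).get? name with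
  | none => false
  | some t => PySem.Set.contains (pvAccepted args) t

def isFlagArgTypeMatch_alt (flags : List String) (flag_dict : List (String × String)) : Bool :=
  flags.all (fun flag => pvFlagOk flag flag_dict)

-- ===== PRECONDITION & SPEC =====
-- Pre_ excludes flags whose whitespace-split is empty (there A raises IndexError, and
-- so does B) and single-token flags carrying extra whitespace WHEN the raw flag string
-- (A's dict key) and the stripped token (B's dict key) disagree on mapping to "NULL" --
-- on such unspecified whitespace corners both key readings are defensible.
def Pre_isFlagArgTypeMatch (flags : List String) (flag_dict : List (String × String)) : Prop :=
  ∀ flag ∈ flags, PySem.Str.split₀ flag ≠ [] ∧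
    ((PySem.Str.split₀ flag).length = 1 →
      ((PySem.Dict.mk flag_dict).get? flag == some "NULL")
        = ((PySem.Dict.mk flag_dict).get? ((PySem.Str.split₀ flag).headD "") == some "NULL"))
instance (flags : List String) (flag_dict : List (String × String)) : Decidable (Pre_isFlagArgTypeMatch flags flag_dict) := by unfold Pre_isFlagArgTypeMatch; infer_instance

def pvWitness_isFlagArgTypeMatch : List String × (List (String × String)) :=
  (["-n 7", "-s ab", "-m 1 2", "-w x y", "-v"],
   [("-n", "NUMBER"), ("-s", "STRING"), ("-m", "NUMBERS"), ("-w", "STRINGS"), ("-v", "NULL")])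

def Spec_isFlagArgTypeMatch (flags : List String) (flag_dict : List (String × String)) (out : Bool) : Prop := out = isFlagArgTypeMatch_alt flags flag_dict
instance (flags : List String) (flag_dict : List (String × String)) (out : Bool) : Decidable (Spec_isFlagArgTypeMatch flags flag_dict out) := by unfold Spec_isFlagArgTypeMatch; infer_instance

-- ===== CLAIM (what is proved, stated in full; the proofs are below) =====
def Claim_equal_isFlagArgTypeMatch : Prop := ∀ (flags : List String) (flag_dict : List (String × String)), Dom_isFlagArgTypeMatch flags flag_dict → Pre_isFlagArgTypeMatch flags flag_dict → Spec_isFlagArgTypeMatch flags flag_dict (isFlagArgTypeMatch flags flag_dict)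

-- ===== LEMMAS AND PROOFS =====

-- one step of A equals B's per-flag check, for a flag admitted by Pre_
theorem pvStep_eq (flag : String) (d : List (String × String)) (r : Bool)
    (h1 : PySem.Str.split₀ flag ≠ [])
    (h2 : (PySem.Str.split₀ flag).length = 1 →
      ((PySem.Dict.mk d).get? flag == some "NULL")
        = ((PySem.Dict.mk d).get? ((PySem.Str.split₀ flag).headD "") == some "NULL")) :
    (let items := PySem.Str.split₀ flag
     if items.length == 1 then
       match (PySem.Dict.mk d).get? flag with
       | none => false
       | some v => if v != "NULL" then false else r
     else
       let flag_name := items.headD ""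
       let flag_args := items.tail
       match (PySem.Dict.mk d).get? flag_name with
       | none => false
       | some t =>
         if t == "NUMBER" then
           if flag_args.length > 1 then false
           else if flag_args.all PySem.Str.strIsdigit then r else false
         else if t == "STRING" then
           if flag_args.length > 1 then false
           else if flag_args.all PySem.Str.strIsalpha then r else false
         else if t == "NULL" then false
         else if t == "NUMBERS" then
           if flag_args.all PySem.Str.strIsdigit then r else false
         else if t == "STRINGS" then
           if flag_args.all PySem.Str.strIsalpha then r else false
         else false) = (pvFlagOk flag d && r) := by
  cases hs : PySem.Str.split₀ flag with
  | nil => exact absurd hs h1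
  | cons n args =>
    cases args with
    | nil =>
      have h := h2 (by rw [hs]; rfl)
      rw [hs, List.headD_cons] at h
      simp only [pvFlagOk, hs, List.headD_cons, List.tail_cons, List.length_cons,
        List.length_nil]
      cases hA : (PySem.Dict.mk d).get? flag <;> cases hB : (PySem.Dict.mk d).get? n <;>
        rw [hA, hB] at h <;>
        simp_all [pvAccepted, PySem.Set.contains, PySem.Set.ofList, PySem.Set.add,
          PySem.Set.empty]
    | cons a as =>
      simp only [pvFlagOk, hs, List.headD_cons, List.tail_cons, List.length_cons]
      have hlen : ((as.length + 1 + 1 : Nat) == 1) = false := by simp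
      rw [hlen]
      simp only [Bool.false_eq_true, if_false]
      cases hget : (PySem.Dict.mk d).get? n with
      | none => simp
      | some t =>
        cases as with
        | nil =>
          rcases Bool.eq_false_or_eq_true ([a].all PySem.Str.strIsdigit) with hd | hd <;>
          rcases Bool.eq_false_or_eq_true ([a].all PySem.Str.strIsalpha) with ha | ha <;>
          simp only [pvAccepted, List.isEmpty_cons, hd, ha, Bool.false_eq_true, if_false,
            if_true, List.length_cons, List.length_nil] <;>
          by_cases hN : t = "NUMBER" <;> by_cases hS : t = "STRING" <;>
          by_cases h0 : t = "NULL" <;> by_cases hNs : t = "NUMBERS" <;>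
          by_cases hSs : t = "STRINGS" <;>
          simp [hN, hS, h0, hNs, hSs, PySem.Set.contains, PySem.Set.add, PySem.Set.empty]
        | cons b bs =>
          rcases Bool.eq_false_or_eq_true ((a :: b :: bs).all PySem.Str.strIsdigit) with hd | hd <;>
          rcases Bool.eq_false_or_eq_true ((a :: b :: bs).all PySem.Str.strIsalpha) with ha | ha <;>
          simp only [pvAccepted, List.isEmpty_cons, hd, ha, Bool.false_eq_true, if_false,
            if_true, List.length_cons] <;>
          by_cases hN : t = "NUMBER" <;> by_cases hS : t = "STRING" <;>
          by_cases h0 : t = "NULL" <;> by_cases hNs : t = "NUMBERS" <;>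
          by_cases hSs : t = "STRINGS" <;>
          simp [hN, hS, h0, hNs, hSs, PySem.Set.contains, PySem.Set.add, PySem.Set.empty]

theorem pvMain (flags : List String) (flag_dict : List (String × String))
    (hpre : Pre_isFlagArgTypeMatch flags flag_dict) :
    isFlagArgTypeMatch flags flag_dict = isFlagArgTypeMatch_alt flags flag_dict := by
  induction flags with
  | nil => rfl
  | cons flag rest ih =>
    have hf := hpre flag (List.mem_cons_self ..)
    have step := pvStep_eq flag flag_dict (isFlagArgTypeMatch rest flag_dict) hf.1 hf.2
    have ihr := ih (fun f hfm => hpre f (List.mem_cons_of_mem _ hfm))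
    simp only [isFlagArgTypeMatch, isFlagArgTypeMatch_alt, List.all_cons] at step ihr ⊢
    rw [step, ihr]

-- ===== VERDICT (by name: the statement is the Claim_ definition above) =====
theorem isFlagArgTypeMatch_spec : Claim_equal_isFlagArgTypeMatch := by
  intro flags flag_dict _ hpre
  exact pvMain flags flag_dict hpre
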